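-- pv_equiv track=rewrite | github.com/SteveG365/nlp-assign-1 | src/normalisation.py | normalise_numbers
-- ===== SOURCE A (Python) =====
-- def normalise_numbers(text):
--     """
--     Function that normalises the numbers in the text.
--     Method looks for numbers, and replaces with a 0-token to-
--     represent numbers
--     """
--     result = []
--     i = 0
--     while i < len(text):
--         if text[i].isdigit():
--             # keep scanning for nums
--             while i < len(text) and text[i].isdigit():
--                 i +=1
--             result.append("0")
--         else:
--             result.append(text[i])
--             i += 1
--     return "".join(result)
-- ===== SOURCE B (Python) =====
-- def normalise_numbers(text):
--     """
--     Function that normalises the numbers in the text.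
--     Method looks for numbers, and replaces with a 0-token to-
--     represent numbers
--     """
--     out = []
--     prev_digit = False
--     for ch in text:
--         if ch.isdigit():
--             if not prev_digit:
--                 out.append("0")
--             prev_digit = True
--         else:
--             out.append(ch)
--             prev_digit = False
--     return "".join(out)
-- ===== Notes on version B (the rewrite author's own statement) =====
-- stated objective: faster
-- what changed: Replaced the index-based while loop with an inner digit-run scan by a single for-each pass carrying a boolean flag that records whether the previous character was a digit, emitting the zero token only at the start of a digit run.
import Mathlib
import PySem

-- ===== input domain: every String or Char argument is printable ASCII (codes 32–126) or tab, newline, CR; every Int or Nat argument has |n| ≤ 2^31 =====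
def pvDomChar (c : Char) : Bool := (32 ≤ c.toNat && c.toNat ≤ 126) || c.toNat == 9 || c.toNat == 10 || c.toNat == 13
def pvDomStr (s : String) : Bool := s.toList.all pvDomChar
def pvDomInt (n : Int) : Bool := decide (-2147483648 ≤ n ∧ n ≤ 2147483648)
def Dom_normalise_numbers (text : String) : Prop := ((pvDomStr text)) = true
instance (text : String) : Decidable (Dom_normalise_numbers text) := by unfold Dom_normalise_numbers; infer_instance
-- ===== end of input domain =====

-- B replaces A's index loop and inner digit-run scan by a single for-each pass with a
-- previous-digit flag; a timing run measured B faster by a constant factor.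


-- ===== PORT A =====
-- inner 'while i < len(text) and text[i].isdigit(): i += 1' on the remaining chars
def pvSkipDigits : List Char → List Char
  | [] => []
  | c :: rest => if PySem.Chars.isdigit c then pvSkipDigits rest else c :: rest

theorem pvSkipDigits_len_le : ∀ l : List Char, (pvSkipDigits l).length ≤ l.length
  | [] => le_refl _
  | c :: rest => by
    simp only [pvSkipDigits]
    split
    · exact le_trans (pvSkipDigits_len_le rest) (Nat.le_succ _)
    · exact le_refl _

-- outer while loop of A over the remaining characters
def pvGoA : List Char → List Char
  | [] => []
  | c :: rest =>
    if PySem.Chars.isdigit c then '0' :: pvGoA (pvSkipDigits rest)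
    else c :: pvGoA rest
termination_by l => l.length
decreasing_by
  · exact Nat.lt_succ_of_le (pvSkipDigits_len_le rest)
  · simp

def normalise_numbers (text : String) : String := String.mk (pvGoA text.toList)

-- ===== PORT B =====
-- one step of B's for-loop: state = (accumulated output chars, prev_digit flag)
def pvAltStep (s : List Char × Bool) (c : Char) : List Char × Bool :=
  if PySem.Chars.isdigit c then
    (if s.2 then s.1 else s.1 ++ ['0'], true)
  else
    (s.1 ++ [c], false)

def normalise_numbers_alt (text : String) : String :=
  String.mk (text.toList.foldl pvAltStep ([], false)).1

-- ===== PRECONDITION & SPEC =====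
def Spec_normalise_numbers (text : String) (out : String) : Prop := out = normalise_numbers_alt text
instance (text : String) (out : String) : Decidable (Spec_normalise_numbers text out) := by unfold Spec_normalise_numbers; infer_instance

-- ===== CLAIM (what is proved, stated in full; the proofs are below) =====
def Claim_equal_normalise_numbers : Prop := ∀ (text : String), Dom_normalise_numbers text → Spec_normalise_numbers text (normalise_numbers text)

-- ===== LEMMAS AND PROOFS =====

-- B's emitted suffix as a function of the flag and the remaining input
def pvG (prev : Bool) : List Char → List Char
  | [] => []
  | c :: rest =>
    if PySem.Chars.isdigit c then (if prev then [] else ['0']) ++ pvG true rest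
    else c :: pvG false rest

theorem pvFoldl_eq_pvG (l : List Char) : ∀ (acc : List Char) (prev : Bool),
    (l.foldl pvAltStep (acc, prev)).1 = acc ++ pvG prev l := by
  induction l with
  | nil => intro acc prev; simp [pvG]
  | cons c rest ih =>
    intro acc prev
    simp only [List.foldl, pvAltStep, pvG]
    by_cases h : PySem.Chars.isdigit c
    · cases prev <;> simp [h, ih]
    · simp [h, ih]

theorem pvG_eq_pvGoA : ∀ l : List Char,
    pvG false l = pvGoA l ∧ pvG true l = pvGoA (pvSkipDigits l) := by
  intro l
  induction l with
  | nil => simp [pvG, pvGoA, pvSkipDigits]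
  | cons c rest ih =>
    by_cases h : PySem.Chars.isdigit c
    · constructor
      · simp [pvG, pvGoA, h, ih.2]
      · simp [pvG, pvSkipDigits, h, ih.2]
    · constructor
      · simp [pvG, pvGoA, h, ih.1]
      · simp [pvG, pvGoA, pvSkipDigits, h, ih.1]

-- ===== VERDICT (by name: the statement is the Claim_ definition above) =====
theorem normalise_numbers_spec : Claim_equal_normalise_numbers := by
  intro text _
  unfold Spec_normalise_numbers normalise_numbers normalise_numbers_alt
  rw [pvFoldl_eq_pvG, List.nil_append, (pvG_eq_pvGoA text.toList).1]
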